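-- pv_equiv track=rewrite | github.com/sajan4s/Python | function_summer_6_9.py | summer_69
-- ===== SOURCE A (Python) =====
-- def summer_69(arr):
--
--      total = 0
--      add = True
--
--      for n in arr:
--          while add:
--              if n != 6:
--                  total += n
--                  break
--              else:
--                  add = False
--          while not add:
--              if n != 9:
--                  break
--              else:
--                  add = True
--                  break
--      return total
-- ===== SOURCE B (Python) =====
-- def summer_69(arr):
--     arr = list(arr)
--     total = 0
--     while True:
--         try:
--             j = arr.index(6)
--         except ValueError:
--             return total + sum(arr)
--         total += sum(arr[:j])
--         try:
--             k = arr.index(9, j + 1)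
--         except ValueError:
--             return total
--         arr = arr[k + 1:]
-- ===== Notes on version B (the rewrite author's own statement) =====
-- stated objective: alternative
-- what changed: Replaces A's per-element add/skip flag toggling with a segment loop that finds the next 6 with list.index, adds the sum of the slice before it, and jumps the cursor past the next 9 (slicing the remainder), summing kept segments as slices.
import Mathlib
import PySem

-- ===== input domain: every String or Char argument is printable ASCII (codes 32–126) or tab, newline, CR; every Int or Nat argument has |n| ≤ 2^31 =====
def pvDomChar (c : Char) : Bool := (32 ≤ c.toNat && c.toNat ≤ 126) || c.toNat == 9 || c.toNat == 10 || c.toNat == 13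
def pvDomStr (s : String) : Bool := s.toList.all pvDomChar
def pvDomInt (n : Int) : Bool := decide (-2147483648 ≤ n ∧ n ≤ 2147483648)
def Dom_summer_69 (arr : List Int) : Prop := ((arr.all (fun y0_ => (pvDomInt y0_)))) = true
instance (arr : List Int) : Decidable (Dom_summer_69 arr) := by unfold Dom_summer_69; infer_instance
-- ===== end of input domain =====

-- B re-implements the per-element flag sweep as an index/slice loop (find next 6, sum the
-- segment before it, jump past the next 9); same values on every input, objective: alternative.

-- ===== PORT A =====
-- body of A's 'for n in arr' loop: each inner 'while' runs at most one effective pass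
-- (first while: if add, either adds n and breaks, or sets add := False and then exits;
--  second while: if not add, breaks immediately unless n == 9, which sets add := True and breaks)
def pvStepA (s : Int × Bool) (n : Int) : Int × Bool :=
  let s1 := if s.2 then (if n ≠ 6 then (s.1 + n, s.2) else (s.1, false)) else s
  if ¬ s1.2 then (if n ≠ 9 then s1 else (s1.1, true)) else s1

def summer_69 (arr : List Int) : Int :=
  (arr.foldl pvStepA (0, true)).1

-- ===== PORT B =====
-- the body of Source B's 'while True' loop, recursing on the sliced remainder arr[k+1:];
-- arr.index(6) = PySem.List.index?; arr.index(9, j+1) is ported as index? on arr.drop (j+1)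
-- (exact: same first-occurrence index, offset by j+1), the ValueError branches are the
-- 'none' cases; sum(...) = List.sum
def summer_69_altLoop (arr : List Int) (total : Int) : Int :=
  match h : PySem.List.index? arr (6 : Int) with
  | none => total + arr.sum
  | some j =>
    let total := total + (PySem.List.slice arr none (some (j : Int))).sum
    match PySem.List.index? (arr.drop (j+1)) (9 : Int) with
    | none => total
    | some k => summer_69_altLoop (PySem.List.slice arr (some ((j+1+k+1 : Nat) : Int)) none) total
termination_by arr.length
decreasing_by
  rw [PySem.List.slice_from_natCast]
  have hmem : (6 : Int) ∈ arr := (PySem.List.index?_isSome_iff arr 6).1 (by rw [h]; rfl)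
  have : arr.length ≠ 0 := by
    intro h0
    exact absurd hmem (by simp [List.length_eq_zero_iff.1 h0])
  simp only [List.length_drop]
  omega

def summer_69_alt (arr : List Int) : Int := summer_69_altLoop arr 0

-- ===== PRECONDITION & SPEC =====
def Spec_summer_69 (arr : List Int) (out : Int) : Prop := out = summer_69_alt arr
instance (arr : List Int) (out : Int) : Decidable (Spec_summer_69 arr out) := by unfold Spec_summer_69; infer_instance

-- ===== CLAIM (what is proved, stated in full; the proofs are below) =====
def Claim_equal_summer_69 : Prop := ∀ (arr : List Int), Dom_summer_69 arr → Spec_summer_69 arr (summer_69 arr)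

-- ===== LEMMAS AND PROOFS =====

-- while 'add' is on and no 6 appears, A just accumulates the sum
theorem foldl_stepA_true_no6 (xs : List Int) (t : Int) (h : (6 : Int) ∉ xs) :
    xs.foldl pvStepA (t, true) = (t + xs.sum, true) := by
  induction xs generalizing t with
  | nil => simp
  | cons x xs ih =>
    have hx : x ≠ 6 := by intro e; exact h (by simp [e])
    have hxs : (6 : Int) ∉ xs := fun m => h (by simp [m])
    simp only [List.foldl_cons, List.sum_cons]
    have hstep : pvStepA (t, true) x = (t + x, true) := by simp [pvStepA, hx]
    rw [hstep, ih _ hxs]; ring_nf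

-- while 'add' is off and no 9 appears, A keeps skipping
theorem foldl_stepA_false_no9 (xs : List Int) (t : Int) (h : (9 : Int) ∉ xs) :
    xs.foldl pvStepA (t, false) = (t, false) := by
  induction xs with
  | nil => rfl
  | cons x xs ih =>
    have hx : x ≠ 9 := by intro e; exact h (by simp [e])
    have hxs : (9 : Int) ∉ xs := fun m => h (by simp [m])
    simp only [List.foldl_cons]
    have hstep : pvStepA (t, false) x = (t, false) := by simp [pvStepA, hx]
    rw [hstep, ih hxs]

theorem main_loop_eq (n : Nat) : ∀ (xs : List Int), xs.length = n → ∀ (t : Int),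
    (xs.foldl pvStepA (t, true)).1 = summer_69_altLoop xs t := by
  induction n using Nat.strong_induction_on with
  | _ n ih =>
    intro xs hn t
    match h6 : PySem.List.index? xs (6 : Int) with
    | none =>
      have : (6 : Int) ∉ xs := (PySem.List.index?_eq_none_iff xs 6).1 h6
      rw [summer_69_altLoop, h6, foldl_stepA_true_no6 xs t this]
    | some j =>
      obtain ⟨pre, suf, hxs, hlen, hnot6⟩ := (PySem.List.index?_eq_some_iff xs 6 j).1 h6
      have htake : PySem.List.slice xs none (some (j : Int)) = pre := by
        rw [PySem.List.slice_to_natCast, hxs, ← hlen, List.take_left]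
      have hdrop : xs.drop (j+1) = suf := by
        rw [hxs, ← hlen, List.drop_length_add_append]
        rfl
      have hfold : xs.foldl pvStepA (t, true) = suf.foldl pvStepA (t + pre.sum, false) := by
        rw [hxs, List.foldl_append, foldl_stepA_true_no6 pre t hnot6]
        simp [pvStepA]
      rw [summer_69_altLoop, h6]
      simp only [hdrop, htake]
      match h9 : PySem.List.index? suf (9 : Int) with
      | none =>
        have : (9 : Int) ∉ suf := (PySem.List.index?_eq_none_iff suf 9).1 h9
        rw [hfold, foldl_stepA_false_no9 suf _ this]
      | some k =>
        obtain ⟨p2, s2, hsuf, hlen2, hnot9⟩ := (PySem.List.index?_eq_some_iff suf 9 k).1 h9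
        have hdrop2 : PySem.List.slice xs (some ((j+1+k+1 : Nat) : Int)) none = s2 := by
          rw [PySem.List.slice_from_natCast,
              show j+1+k+1 = (j+1)+(k+1) by omega, ← List.drop_drop, hdrop, hsuf, ← hlen2,
              List.drop_length_add_append]
          rfl
        have hlt : s2.length < n := by
          rw [← hn, hxs, hsuf]; simp; omega
        have hstep9 : pvStepA (t + pre.sum, false) 9 = (t + pre.sum, true) := by
          simp [pvStepA]
        show _ = summer_69_altLoop (PySem.List.slice xs (some ((j+1+k+1 : Nat) : Int)) none) (t + pre.sum)
        rw [hdrop2, hfold, hsuf, List.foldl_append, foldl_stepA_false_no9 p2 _ hnot9,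
            List.foldl_cons, hstep9]
        exact ih s2.length hlt s2 rfl (t + pre.sum)

-- ===== VERDICT (by name: the statement is the Claim_ definition above) =====
theorem summer_69_spec : Claim_equal_summer_69 := by
  intro arr _
  unfold Spec_summer_69 summer_69 summer_69_alt
  exact main_loop_eq arr.length arr rfl 0
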